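-- pv_equiv track=rewrite | github.com/keedjk7/Data-Structure | Lab2/63010139_Lab2_4.py | check_equal
-- ===== SOURCE A (Python) =====
-- def check_equal(show_list,temp):
--     if len(show_list)>0:
--         list2 = sorted(temp)
--         for i in range (len(show_list)):
--             list1 = sorted(show_list[i])
--             if list1 == list2 :
--                 list1.clear()
--                 return False
--     return True
-- ===== SOURCE B (Python) =====
-- def check_equal(show_list, temp):
--     target = {}
--     for x in temp:
--         target[x] = target.get(x, 0) + 1
--     for sub in show_list:
--         counts = {}
--         for x in sub:
--             counts[x] = counts.get(x, 0) + 1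
--         if counts == target:
--             return False
--     return True
-- ===== Notes on version B (the rewrite author's own statement) =====
-- stated objective: alternative
-- what changed: Replaces per-sublist sorting and sorted-list comparison with frequency-dict (multiset) comparison against a table built once from temp.
import Mathlib
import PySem

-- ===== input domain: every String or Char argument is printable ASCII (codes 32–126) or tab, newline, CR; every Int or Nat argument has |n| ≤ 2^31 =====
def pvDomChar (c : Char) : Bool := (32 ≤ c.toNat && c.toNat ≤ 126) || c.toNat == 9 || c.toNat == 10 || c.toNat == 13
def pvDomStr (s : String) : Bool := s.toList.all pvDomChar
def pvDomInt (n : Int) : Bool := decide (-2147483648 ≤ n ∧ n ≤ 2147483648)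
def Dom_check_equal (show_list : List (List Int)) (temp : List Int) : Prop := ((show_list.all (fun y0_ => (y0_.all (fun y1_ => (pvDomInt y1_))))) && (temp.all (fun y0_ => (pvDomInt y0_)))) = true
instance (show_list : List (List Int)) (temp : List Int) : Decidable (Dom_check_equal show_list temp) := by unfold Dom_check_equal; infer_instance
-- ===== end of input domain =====

-- B replaces per-sublist sorting with a frequency-dict (multiset) comparison against a table built once from temp; alternative algorithm, similar cost.


-- ===== PORT A =====
-- the 'for i in range(len(show_list))' loop with early 'return False'
def checkLoopA (items : List (List Int)) (list2 : List Int) : Bool :=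
  match items with
  | [] => true
  | sub :: rest =>
    let list1 := PySem.List.sorted sub (fun x => x) false
    if list1 = list2 then false else checkLoopA rest list2

def check_equal (show_list : List (List Int)) (temp : List Int) : Bool :=
  if show_list.length > 0 then
    let list2 := PySem.List.sorted temp (fun x => x) false
    checkLoopA show_list list2
  else true

-- ===== PORT B =====
-- the 'd[x] = d.get(x, 0) + 1' counting loop
def pyCounter (xs : List Int) : PySem.Dict Int Int :=
  xs.foldl (fun d x => d.insert x (d.getD x 0 + 1)) PySem.Dict.empty

-- Python's order-insensitive dict '==': same size and every item of d1 looked up in d2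
def pyDictEq (d1 d2 : PySem.Dict Int Int) : Bool :=
  d1.size == d2.size && d1.items.all (fun p => d2.get? p.1 == some p.2)

-- the 'for sub in show_list' loop with early 'return False'
def checkLoopB (items : List (List Int)) (target : PySem.Dict Int Int) : Bool :=
  match items with
  | [] => true
  | sub :: rest =>
    if pyDictEq (pyCounter sub) target then false else checkLoopB rest target

def check_equal_alt (show_list : List (List Int)) (temp : List Int) : Bool :=
  checkLoopB show_list (pyCounter temp)

-- ===== PRECONDITION & SPEC =====
def Spec_check_equal (show_list : List (List Int)) (temp : List Int) (out : Bool) : Prop := out = check_equal_alt show_list temp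
instance (show_list : List (List Int)) (temp : List Int) (out : Bool) : Decidable (Spec_check_equal show_list temp out) := by unfold Spec_check_equal; infer_instance

-- ===== CLAIM (what is proved, stated in full; the proofs are below) =====
def Claim_equal_check_equal : Prop := ∀ (show_list : List (List Int)) (temp : List Int), Dom_check_equal show_list temp → Spec_check_equal show_list temp (check_equal show_list temp)

-- ===== LEMMAS AND PROOFS =====

lemma get?_counter_of_mem (ys : List Int) (k : Int) (h : k ∈ ys) :
    (PySem.Dict.counter ys : PySem.Dict Int Int).get? k = some ((ys.count k : Nat) : Int) := by
  have hgd := PySem.Dict.getD_eq_get?_getD (PySem.Dict.counter ys : PySem.Dict Int Int) k 0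
  rw [PySem.Dict.getD_counter] at hgd
  rcases ho : (PySem.Dict.counter ys : PySem.Dict Int Int).get? k with _ | v
  · rw [ho] at hgd
    simp at hgd
    have hc : 0 < ys.count k := List.count_pos_iff.mpr h
    omega
  · rw [ho] at hgd
    simp at hgd
    rw [hgd]

lemma mem_of_get?_counter_some (ys : List Int) (k : Int) (v : Int)
    (h : (PySem.Dict.counter ys : PySem.Dict Int Int).get? k = some v) :
    k ∈ ys ∧ v = ((ys.count k : Nat) : Int) := by
  have hk : k ∈ (PySem.Dict.counter ys : PySem.Dict Int Int).keys := by
    by_contra hn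
    rw [← PySem.Dict.get?_eq_none_iff_not_mem_keys] at hn
    simp [h] at hn
  rw [PySem.Dict.keys_counter] at hk
  have hmem : k ∈ ys := (PySem.Set.mem_ofList ys k).mp hk
  have hgd := PySem.Dict.getD_eq_get?_getD (PySem.Dict.counter ys : PySem.Dict Int Int) k 0
  rw [PySem.Dict.getD_counter, h] at hgd
  simp at hgd
  exact ⟨hmem, hgd.symm⟩

-- Python's 'Counter(xs) == Counter(ys)' is exactly 'xs is a permutation of ys'
lemma pyDictEq_counter_iff (xs ys : List Int) :
    pyDictEq (pyCounter xs) (pyCounter ys) = true ↔ xs.Perm ys := by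
  unfold pyCounter
  rw [PySem.Dict.foldl_insert_getD_add_one_eq_counter, PySem.Dict.foldl_insert_getD_add_one_eq_counter]
  unfold pyDictEq
  rw [Bool.and_eq_true, beq_iff_eq, List.all_eq_true]
  constructor
  · rintro ⟨hsz, hall⟩
    have hcnt : ∀ k ∈ xs, k ∈ ys ∧ xs.count k = ys.count k := by
      intro k hk
      have hp : (k, ((xs.count k : Nat) : Int)) ∈ (PySem.Dict.counter xs : PySem.Dict Int Int).items := by
        rw [PySem.Dict.items_counter]
        exact List.mem_map.mpr ⟨k, (PySem.Set.mem_ofList xs k).mpr hk, rfl⟩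
      have := hall _ hp
      rw [beq_iff_eq] at this
      obtain ⟨hm, hv⟩ := mem_of_get?_counter_some ys k _ this
      simp at hv
      exact ⟨hm, by exact_mod_cast hv⟩
    have hsub : (PySem.Set.ofList xs : List Int) ⊆ PySem.Set.ofList ys := by
      intro k hk
      exact (PySem.Set.mem_ofList ys k).mpr (hcnt k ((PySem.Set.mem_ofList xs k).mp hk)).1
    have hlen : (PySem.Set.ofList ys : List Int).length ≤ (PySem.Set.ofList xs : List Int).length := by
      have := hsz
      simp only [PySem.Dict.size, PySem.Dict.items_counter] at this
      simp [List.length_map] at this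
      omega
    have hperm := (List.subperm_of_subset (PySem.Set.nodup_ofList xs) hsub).perm_of_length_le hlen
    rw [List.perm_iff_count]
    intro k
    by_cases hk : k ∈ xs
    · exact (hcnt k hk).2
    · have hky : k ∉ ys := by
        intro hky
        have : k ∈ (PySem.Set.ofList xs : List Int) :=
          hperm.mem_iff.mpr ((PySem.Set.mem_ofList ys k).mpr hky)
        exact hk ((PySem.Set.mem_ofList xs k).mp this)
      rw [List.count_eq_zero.mpr hk, List.count_eq_zero.mpr hky]
  · intro hperm
    have hcnt : ∀ k, xs.count k = ys.count k := List.perm_iff_count.mp hperm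
    have hkeys : ((PySem.Set.ofList xs : List Int)).Perm (PySem.Set.ofList ys) := by
      rw [List.perm_ext_iff_of_nodup (PySem.Set.nodup_ofList xs) (PySem.Set.nodup_ofList ys)]
      intro k
      rw [PySem.Set.mem_ofList, PySem.Set.mem_ofList, hperm.mem_iff]
    constructor
    · simp [PySem.Dict.size, PySem.Dict.items_counter, hkeys.length_eq]
    · intro p hp
      rw [PySem.Dict.items_counter] at hp
      obtain ⟨k, hk, rfl⟩ := List.mem_map.mp hp
      have hky : k ∈ ys := hperm.mem_iff.mp ((PySem.Set.mem_ofList xs k).mp hk)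
      rw [beq_iff_eq, get?_counter_of_mem ys k hky, hcnt k]

lemma loop_eq (sl : List (List Int)) (temp : List Int) :
    checkLoopA sl (PySem.List.sorted temp (fun x => x) false) = checkLoopB sl (pyCounter temp) := by
  induction sl with
  | nil => rfl
  | cons sub rest ih =>
    simp only [checkLoopA, checkLoopB]
    have h : (PySem.List.sorted sub (fun x => x) false = PySem.List.sorted temp (fun x => x) false)
        ↔ (pyDictEq (pyCounter sub) (pyCounter temp) = true) := by
      rw [PySem.List.sorted_id_eq_sorted_id_iff_perm, pyDictEq_counter_iff]
    by_cases hc : pyDictEq (pyCounter sub) (pyCounter temp) = true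
    · rw [if_pos (h.mpr hc), if_pos hc]
    · rw [if_neg (fun hh => hc (h.mp hh)), if_neg hc]
      exact ih

-- ===== VERDICT (by name: the statement is the Claim_ definition above) =====
theorem check_equal_spec : Claim_equal_check_equal := by
  intro sl temp _
  unfold Spec_check_equal check_equal check_equal_alt
  cases sl with
  | nil => rfl
  | cons a r => simpa using loop_eq (a :: r) temp
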